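-- pv_equiv track=rewrite | github.com/Kavan-Shetty/Financial_risk_model | src/phase5_scoring/credit_score.py | assign_risk_category
-- ===== SOURCE A (Python) =====
-- def assign_risk_category(scores):
--
--     categories = []
--
--     for score in scores:
--
--         if score >= 800:
--             categories.append("Excellent")
--
--         elif score >= 740:
--             categories.append("Very Good")
--
--         elif score >= 670:
--             categories.append("Good")
--
--         elif score >= 580:
--             categories.append("Fair")
--
--         else:
--             categories.append("High Risk")
--
--     return categories
-- ===== SOURCE B (Python) =====
-- _BREAKS = [580, 670, 740, 800]
-- _LABELS = ["High Risk", "Fair", "Good", "Very Good", "Excellent"]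
--
--
-- def _bisect_right(a, x):
--     lo, hi = 0, len(a)
--     while lo < hi:
--         mid = (lo + hi) // 2
--         if x < a[mid]:
--             hi = mid
--         else:
--             lo = mid + 1
--     return lo
--
--
-- def assign_risk_category(scores):
--     return [_LABELS[_bisect_right(_BREAKS, s)] for s in scores]
-- ===== Notes on version B (the rewrite author's own statement) =====
-- stated objective: idiomatic
-- what changed: Replaced the cascading if/elif chain with a precomputed sorted breakpoint table and a hand-written bisect_right binary search that indexes into a parallel labels list.
import Mathlib
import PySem

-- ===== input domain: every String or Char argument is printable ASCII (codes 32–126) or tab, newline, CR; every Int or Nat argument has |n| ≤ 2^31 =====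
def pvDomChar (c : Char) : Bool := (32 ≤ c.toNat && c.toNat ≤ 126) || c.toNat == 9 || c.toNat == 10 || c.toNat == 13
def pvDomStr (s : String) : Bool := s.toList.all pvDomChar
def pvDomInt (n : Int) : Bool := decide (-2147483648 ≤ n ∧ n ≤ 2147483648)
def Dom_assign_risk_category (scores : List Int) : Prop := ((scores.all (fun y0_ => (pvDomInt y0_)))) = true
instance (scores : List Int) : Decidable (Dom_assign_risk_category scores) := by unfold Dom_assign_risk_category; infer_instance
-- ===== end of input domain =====

-- B replaces A's cascading if/elif chain by a binary search (bisect_right) over a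
-- precomputed breakpoint table with a parallel labels list (idiomatic; same cost).


-- ===== PORT A =====
-- literal transliteration: loop appending the if/elif chain's label
def assign_risk_category (scores : List Int) : List String :=
  scores.foldl (fun categories score =>
    if score ≥ 800 then categories ++ ["Excellent"]
    else if score ≥ 740 then categories ++ ["Very Good"]
    else if score ≥ 670 then categories ++ ["Good"]
    else if score ≥ 580 then categories ++ ["Fair"]
    else categories ++ ["High Risk"]) []

-- ===== PORT B =====
def pvBreaks : List Int := [580, 670, 740, 800]
def pvLabels : List String := ["High Risk", "Fair", "Good", "Very Good", "Excellent"]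

-- transliteration of Source B's while loop; the fuel (= initial hi - lo = length) only
-- bounds the iteration count, which shrinks by at least 1 per step
def pvBisectLoop : Nat → List Int → Int → Nat → Nat → Nat
  | 0, _, _, lo, _ => lo
  | fuel + 1, a, x, lo, hi =>
    if lo < hi then
      let mid := (lo + hi) / 2
      if x < a.getD mid 0 then pvBisectLoop fuel a x lo mid
      else pvBisectLoop fuel a x (mid + 1) hi
    else lo

def pvBisectRight (a : List Int) (x : Int) : Nat := pvBisectLoop a.length a x 0 a.length

def assign_risk_category_alt (scores : List Int) : List String :=
  scores.map (fun s => pvLabels.getD (pvBisectRight pvBreaks s) "")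

-- ===== PRECONDITION & SPEC =====
def Spec_assign_risk_category (scores : List Int) (out : List String) : Prop := out = assign_risk_category_alt scores
instance (scores : List Int) (out : List String) : Decidable (Spec_assign_risk_category scores out) := by unfold Spec_assign_risk_category; infer_instance

-- ===== CLAIM (what is proved, stated in full; the proofs are below) =====
def Claim_equal_assign_risk_category : Prop := ∀ (scores : List Int), Dom_assign_risk_category scores → Spec_assign_risk_category scores (assign_risk_category scores)

-- ===== LEMMAS AND PROOFS =====

-- the binary search, evaluated on the fixed breakpoint table (fuel bounds unfolding)
theorem pv_bis_eq (s : Int) :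
    pvBisectRight pvBreaks s =
      if s < 580 then 0 else if s < 670 then 1 else if s < 740 then 2
      else if s < 800 then 3 else 4 := by
  unfold pvBisectRight pvBreaks
  simp only [List.length_cons, List.length_nil, pvBisectLoop, List.getD]
  norm_num
  split_ifs <;> omega

-- one element: the if/elif chain agrees with binary search into the label table
theorem pv_elem_eq (s : Int) :
    (if s ≥ 800 then "Excellent"
     else if s ≥ 740 then "Very Good"
     else if s ≥ 670 then "Good"
     else if s ≥ 580 then "Fair"
     else "High Risk") = pvLabels.getD (pvBisectRight pvBreaks s) "" := by
  rw [pv_bis_eq]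
  split_ifs <;> first | rfl | omega

theorem pv_foldl_acc (scores : List Int) (acc : List String) :
    scores.foldl (fun categories score =>
      if score ≥ 800 then categories ++ ["Excellent"]
      else if score ≥ 740 then categories ++ ["Very Good"]
      else if score ≥ 670 then categories ++ ["Good"]
      else if score ≥ 580 then categories ++ ["Fair"]
      else categories ++ ["High Risk"]) acc
    = acc ++ scores.map (fun s => pvLabels.getD (pvBisectRight pvBreaks s) "") := by
  induction scores generalizing acc with
  | nil => simp
  | cons x xs ih =>
    have hstep : (if x ≥ 800 then acc ++ ["Excellent"]
        else if x ≥ 740 then acc ++ ["Very Good"]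
        else if x ≥ 670 then acc ++ ["Good"]
        else if x ≥ 580 then acc ++ ["Fair"]
        else acc ++ ["High Risk"])
        = acc ++ [pvLabels.getD (pvBisectRight pvBreaks x) ""] := by
      rw [← pv_elem_eq x]
      split_ifs <;> rfl
    rw [List.foldl_cons]
    rw [hstep, ih, List.map_cons, List.append_assoc, List.singleton_append]

-- ===== VERDICT (by name: the statement is the Claim_ definition above) =====
theorem assign_risk_category_spec : Claim_equal_assign_risk_category := by
  intro scores _
  unfold Spec_assign_risk_category assign_risk_category assign_risk_category_alt
  simpa using pv_foldl_acc scores []
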